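-- pv_equiv track=rewrite | github.com/Spencer320/2026Spring-BUAA-SE-EPP_IID | EPP-Backend-Dev/research_agent/tools/web_search_executor.py | _is_whitelisted_domain
-- ===== SOURCE A (Python) =====
-- def _is_whitelisted_domain(domain: str, whitelist: list[str]) -> bool:
--     base = (domain or "").strip().lower()
--     if not base:
--         return False
--     for item in whitelist:
--         allow = (item or "").strip().lower()
--         if not allow:
--             continue
--         if base == allow or base.endswith(f".{allow}"):
--             return True
--     return False
-- ===== SOURCE B (Python) =====
-- def _is_whitelisted_domain(domain: str, whitelist: list[str]) -> bool:
--     base = (domain or "").strip().lower()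
--     if not base:
--         return False
--     allowed = set()
--     for item in whitelist:
--         a = (item or "").strip().lower()
--         if a:
--             allowed.add(a)
--     cands = {base}
--     for i, ch in enumerate(base):
--         if ch == '.':
--             cands.add(base[i + 1:])
--     return not allowed.isdisjoint(cands)
-- ===== Notes on version B (the rewrite author's own statement) =====
-- stated objective: alternative
-- what changed: Instead of scanning the whitelist and testing base==entry / base.endswith('.'+entry) per entry, B builds a set of normalized nonempty whitelist entries once, enumerates the domain's own dot-boundary suffixes (base plus base[i+1:] at each '.'), and answers by set disjointness.
import Mathlib
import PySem

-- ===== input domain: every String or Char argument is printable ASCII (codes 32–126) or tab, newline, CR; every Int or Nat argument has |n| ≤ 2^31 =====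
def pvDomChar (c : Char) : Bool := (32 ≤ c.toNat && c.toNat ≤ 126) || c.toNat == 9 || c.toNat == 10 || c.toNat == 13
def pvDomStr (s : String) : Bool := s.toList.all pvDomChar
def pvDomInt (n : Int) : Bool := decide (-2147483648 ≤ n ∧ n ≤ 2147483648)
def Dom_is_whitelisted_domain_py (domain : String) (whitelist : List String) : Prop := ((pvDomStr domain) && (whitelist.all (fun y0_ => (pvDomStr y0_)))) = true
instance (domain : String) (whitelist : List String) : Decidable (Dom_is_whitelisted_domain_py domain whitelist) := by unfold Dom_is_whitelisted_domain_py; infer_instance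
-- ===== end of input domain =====

-- B replaces A's per-entry suffix test with a set of normalized whitelist entries
-- intersected against the domain's own dot-boundary suffixes (objective: alternative).
-- ('domain or ""' / 'item or ""' only matter for falsy strings, i.e. "", so they are identity here.)

-- ===== PORT A =====
def pvGoA (base : String) : List String → Bool
  | [] => false
  | item :: rest =>
      let allow := PySem.Str.lower (PySem.Str.strip item)
      if allow = "" then pvGoA base rest
      else if base = allow || PySem.Str.endswith base ("." ++ allow) then true
      else pvGoA base rest

def is_whitelisted_domain_py (domain : String) (whitelist : List String) : Bool :=
  let base := PySem.Str.lower (PySem.Str.strip domain)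
  if base = "" then false
  else pvGoA base whitelist

-- ===== PORT B =====
def is_whitelisted_domain_py_alt (domain : String) (whitelist : List String) : Bool :=
  let base := PySem.Str.lower (PySem.Str.strip domain)
  if base = "" then false
  else
    let allowed : PySem.Set String := whitelist.foldl (fun s item =>
      let a := PySem.Str.lower (PySem.Str.strip item)
      if a = "" then s else PySem.Set.add s a) PySem.Set.empty
    let cands : PySem.Set String := (PySem.List.enumerate base.toList 0).foldl (fun s p =>
      if p.2 = '.' then PySem.Set.add s (PySem.Str.slice base (some (p.1 + 1)) none) else s)
      (PySem.Set.add PySem.Set.empty base)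
    !(PySem.Set.isdisjoint allowed cands)

-- ===== PRECONDITION & SPEC =====
def Spec_is_whitelisted_domain_py (domain : String) (whitelist : List String) (out : Bool) : Prop := out = is_whitelisted_domain_py_alt domain whitelist
instance (domain : String) (whitelist : List String) (out : Bool) : Decidable (Spec_is_whitelisted_domain_py domain whitelist out) := by unfold Spec_is_whitelisted_domain_py; infer_instance

-- ===== CLAIM (what is proved, stated in full; the proofs are below) =====
def Claim_equal_is_whitelisted_domain_py : Prop := ∀ (domain : String) (whitelist : List String), Dom_is_whitelisted_domain_py domain whitelist → Spec_is_whitelisted_domain_py domain whitelist (is_whitelisted_domain_py domain whitelist)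

-- ===== LEMMAS AND PROOFS =====

theorem pvGoA_iff (base : String) (wl : List String) :
    pvGoA base wl = true ↔ ∃ it ∈ wl,
      PySem.Str.lower (PySem.Str.strip it) ≠ "" ∧
      (base = PySem.Str.lower (PySem.Str.strip it) ∨
        PySem.Str.endswith base ("." ++ PySem.Str.lower (PySem.Str.strip it)) = true) := by
  induction wl with
  | nil => simp [pvGoA]
  | cons it rest ih =>
      simp only [pvGoA]
      split_ifs with h1 h2
      · simp [ih, h1]
      · simp only [Bool.or_eq_true, decide_eq_true_eq] at h2
        simp only [true_iff]
        exact ⟨it, List.mem_cons_self, h1, h2⟩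
      · simp only [Bool.or_eq_true, decide_eq_true_eq] at h2
        simp only [List.mem_cons, ih]
        constructor
        · rintro ⟨x, hx, hne, hor⟩; exact ⟨x, Or.inr hx, hne, hor⟩
        · rintro ⟨x, hx, hne, hor⟩
          rcases hx with rfl | hx
          · exact absurd hor h2
          · exact ⟨x, hx, hne, hor⟩

theorem pvAllowed_mem (wl : List String) (s : PySem.Set String) (a : String) :
    a ∈ wl.foldl (fun s item =>
        let x := PySem.Str.lower (PySem.Str.strip item)
        if x = "" then s else PySem.Set.add s x) s ↔
      a ∈ s ∨ ∃ it ∈ wl, PySem.Str.lower (PySem.Str.strip it) ≠ "" ∧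
        a = PySem.Str.lower (PySem.Str.strip it) := by
  induction wl generalizing s with
  | nil => simp
  | cons it rest ih =>
      simp only [List.foldl_cons, ih]
      split_ifs with h
      · simp only [List.mem_cons]
        constructor
        · rintro (ha | ⟨x, hx, hne, rfl⟩)
          · exact Or.inl ha
          · exact Or.inr ⟨x, Or.inr hx, hne, rfl⟩
        · rintro (ha | ⟨x, (rfl | hx), hne, rfl⟩)
          · exact Or.inl ha
          · exact absurd h hne
          · exact Or.inr ⟨x, hx, hne, rfl⟩
      · simp only [PySem.Set.mem_add, List.mem_cons]
        constructor
        · rintro ((ha | rfl) | ⟨x, hx, hne, rfl⟩)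
          · exact Or.inl ha
          · exact Or.inr ⟨it, Or.inl rfl, h, rfl⟩
          · exact Or.inr ⟨x, Or.inr hx, hne, rfl⟩
        · rintro (ha | ⟨x, (rfl | hx), hne, rfl⟩)
          · exact Or.inl (Or.inl ha)
          · exact Or.inl (Or.inr rfl)
          · exact Or.inr ⟨x, hx, hne, rfl⟩

theorem pvCands_mem (base : String) (l : List (Int × Char)) (s : PySem.Set String) (a : String) :
    a ∈ l.foldl (fun s p => if p.2 = '.' then PySem.Set.add s (PySem.Str.slice base (some (p.1 + 1)) none) else s) s ↔
      a ∈ s ∨ ∃ p ∈ l, p.2 = '.' ∧ a = PySem.Str.slice base (some (p.1 + 1)) none := by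
  induction l generalizing s with
  | nil => simp
  | cons p rest ih =>
      simp only [List.foldl_cons, ih]
      split_ifs with h
      · simp only [PySem.Set.mem_add, List.mem_cons]
        constructor
        · rintro ((ha | rfl) | ⟨q, hq, hdot, rfl⟩)
          · exact Or.inl ha
          · exact Or.inr ⟨p, Or.inl rfl, h, rfl⟩
          · exact Or.inr ⟨q, Or.inr hq, hdot, rfl⟩
        · rintro (ha | ⟨q, (rfl | hq), hdot, rfl⟩)
          · exact Or.inl (Or.inl ha)
          · exact Or.inl (Or.inr rfl)
          · exact Or.inr ⟨q, hq, hdot, rfl⟩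
      · simp only [List.mem_cons]
        constructor
        · rintro (ha | ⟨q, hq, hdot, rfl⟩)
          · exact Or.inl ha
          · exact Or.inr ⟨q, Or.inr hq, hdot, rfl⟩
        · rintro (ha | ⟨q, (rfl | hq), hdot, rfl⟩)
          · exact Or.inl ha
          · exact absurd hdot h
          · exact Or.inr ⟨q, hq, hdot, rfl⟩

theorem pvDotSuffix (L al : List Char) :
    ('.' :: al) <:+ L ↔ ∃ k, ∃ _ : k < L.length, L[k] = '.' ∧ al = L.drop (k + 1) := by
  constructor
  · rintro ⟨t, rfl⟩
    refine ⟨t.length, by simp, ?_, ?_⟩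
    · simp
    · simp
  · rintro ⟨k, hk, hdot, rfl⟩
    refine ⟨L.take k, ?_⟩
    conv_rhs => rw [← List.take_append_drop k L]
    rw [List.drop_eq_getElem_cons hk, hdot]

theorem pvStringEq_iff (a b : String) : a = b ↔ a.toList = b.toList := by
  exact ⟨fun h => h ▸ rfl, String.toList_inj.mp⟩

theorem pvNotDisjoint (s t : PySem.Set String) :
    (!(PySem.Set.isdisjoint s t)) = true ↔ ∃ a ∈ s, a ∈ t := by
  cases h : PySem.Set.isdisjoint s t with
  | false =>
      simp only [Bool.not_false, true_iff]
      by_contra hc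
      push Not at hc
      rw [(PySem.Set.isdisjoint_iff s t).mpr hc] at h
      exact Bool.noConfusion h
  | true =>
      refine iff_of_false (by simp) ?_
      rintro ⟨a, ha, hat⟩
      exact ((PySem.Set.isdisjoint_iff s t).mp h a ha) hat

theorem pvSliceDrop (base : String) (k : Nat) :
    PySem.Str.slice base (some ((0 : Int) + (k : Int) + 1)) none =
      String.ofList (base.toList.drop (k + 1)) := by
  rw [pvStringEq_iff, String.toList_ofList]
  have h1 : (0 : Int) + (k : Int) + 1 = ((k + 1 : Nat) : Int) := by push_cast; ring
  simp only [PySem.Str.toList_slice, PySem.Chars.slice_eq_listSlice, h1,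
    PySem.List.slice_from_natCast]

-- A's test on one entry equals "a is a dot-boundary suffix candidate of base"
theorem pvSuffixTest (base a : String) :
    (base = a ∨ PySem.Str.endswith base ("." ++ a) = true) ↔
      (a = base ∨ ∃ p ∈ PySem.List.enumerate base.toList 0, p.2 = '.' ∧
        a = PySem.Str.slice base (some (p.1 + 1)) none) := by
  have hend : PySem.Str.endswith base ("." ++ a) = true ↔
      ('.' :: a.toList) <:+ base.toList := by
    rw [PySem.Str.endswith_eq, PySem.Chars.endswith_iff, String.toList_append]
    rfl
  constructor
  · rintro (rfl | h)
    · exact Or.inl rfl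
    · right
      obtain ⟨k, hk, hdot, hdrop⟩ := (pvDotSuffix _ _).mp (hend.mp h)
      refine ⟨((0 : Int) + k, base.toList[k]), ?_, by simpa using hdot, ?_⟩
      · rw [PySem.List.mem_enumerate_iff]; exact ⟨k, hk, rfl⟩
      · rw [pvSliceDrop, pvStringEq_iff, String.toList_ofList]; exact hdrop
  · rintro (rfl | ⟨p, hp, hdot, rfl⟩)
    · exact Or.inl rfl
    · right
      rw [PySem.List.mem_enumerate_iff] at hp
      obtain ⟨k, hk, rfl⟩ := hp
      simp only at hdot
      rw [hend, pvSliceDrop, String.toList_ofList]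
      exact (pvDotSuffix _ _).mpr ⟨k, hk, hdot, rfl⟩

-- ===== VERDICT (by name: the statement is the Claim_ definition above) =====
theorem is_whitelisted_domain_py_spec : Claim_equal_is_whitelisted_domain_py := by
  intro domain whitelist _
  unfold Spec_is_whitelisted_domain_py is_whitelisted_domain_py is_whitelisted_domain_py_alt
  set base := PySem.Str.lower (PySem.Str.strip domain) with hbase
  by_cases hb : base = ""
  · simp [hb]
  · simp only [hb, if_false]
    rw [Bool.eq_iff_iff, pvGoA_iff, pvNotDisjoint]
    constructor
    · rintro ⟨it, hit, hne, hor⟩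
      refine ⟨PySem.Str.lower (PySem.Str.strip it), ?_, ?_⟩
      · exact (pvAllowed_mem _ _ _).mpr (Or.inr ⟨it, hit, hne, rfl⟩)
      · rw [pvCands_mem base]
        rcases (pvSuffixTest base _).mp hor with h | h
        · exact Or.inl (by simp [h])
        · exact Or.inr h
    · rintro ⟨a, hall, hcand⟩
      obtain ⟨it, hit, hne, rfl⟩ := ((pvAllowed_mem _ _ _).mp hall).resolve_left (by simp)
      refine ⟨it, hit, hne, (pvSuffixTest base _).mpr ?_⟩
      rcases (pvCands_mem base _ _ _).mp hcand with h | h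
      · exact Or.inl (by simpa [PySem.Set.mem_add] using h)
      · exact Or.inr h
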